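-- pv_equiv track=rewrite | github.com/ellie-as/language-decoding-expts | create_subj_BA_jsons.py | make_rois_exclusive
-- ===== SOURCE A (Python) =====
-- def make_rois_exclusive(rois):
--     """Remove overlapping assignments, giving priority to more anterior regions."""
--     priority = ["BA_10", "BA_9_46", "BA_8", "BA_6", "BROCA"]
--
--     assigned  = set()
--     new_rois  = {}
--
--     for k in priority:
--         idx = set(map(int, rois.get(k, [])))
--         idx = idx - assigned
--         new_rois[k] = sorted(idx)
--         assigned.update(idx)
--
--     # recompute full frontal from exclusive subsets
--     full = set()
--     for v in new_rois.values():
--         full.update(v)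
--     new_rois["BA_full_frontal"] = sorted(full)
--
--     return new_rois
-- ===== SOURCE B (Python) =====
-- def make_rois_exclusive(rois):
--     """Remove overlapping assignments, giving priority to more anterior regions."""
--     priority = ["BA_10", "BA_9_46", "BA_8", "BA_6", "BROCA"]
--
--     # ownership table: each index is owned by the first (most anterior) key listing it
--     owner = {}
--     for k in priority:
--         for i in rois.get(k, []):
--             i = int(i)
--             if i not in owner:
--                 owner[i] = k
--
--     # group the owned indices, in ascending order, back by owner
--     new_rois = {k: [] for k in priority}
--     for i in sorted(owner):
--         new_rois[owner[i]].append(i)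
--
--     new_rois["BA_full_frontal"] = sorted(owner)
--     return new_rois
-- ===== Notes on version B (the rewrite author's own statement) =====
-- stated objective: alternative
-- what changed: Replaces the accumulate-and-subtract set loop (per-key set difference against a growing 'assigned' set, then a second union pass for BA_full_frontal) by a first-owner table: one pass records each index's first (most anterior) owning key, then a single pass over the sorted indices groups them back by owner, and BA_full_frontal is just the sorted owner keys.
import Mathlib
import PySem

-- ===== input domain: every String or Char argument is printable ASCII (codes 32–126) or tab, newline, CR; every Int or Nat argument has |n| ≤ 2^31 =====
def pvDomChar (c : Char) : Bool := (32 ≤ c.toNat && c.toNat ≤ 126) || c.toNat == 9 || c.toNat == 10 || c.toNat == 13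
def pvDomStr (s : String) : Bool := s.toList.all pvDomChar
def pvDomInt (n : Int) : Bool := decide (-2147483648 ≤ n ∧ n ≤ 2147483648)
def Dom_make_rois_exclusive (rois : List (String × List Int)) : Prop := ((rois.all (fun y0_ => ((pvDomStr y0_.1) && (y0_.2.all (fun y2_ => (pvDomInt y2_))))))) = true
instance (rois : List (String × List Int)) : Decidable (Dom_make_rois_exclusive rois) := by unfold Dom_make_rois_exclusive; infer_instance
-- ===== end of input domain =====

-- B replaces A's accumulate-and-subtract set loop by a first-owner table (earliest
-- priority key wins) plus one grouping pass over the sorted owned indices (objective: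
-- alternative, same cost).

-- ===== PORT A =====
-- Literal port of A. rois.get(k, []) -> Dict.getD; set(map(int, l)) = set(l) on int lists -> Set.ofList.
def make_rois_exclusive (rois : List (String × List Int)) : List (String × List Int) :=
  let priority : List String := ["BA_10", "BA_9_46", "BA_8", "BA_6", "BROCA"]
  let d : PySem.Dict String (List Int) := PySem.Dict.mk rois
  let st := priority.foldl
    (fun (st : PySem.Set Int × PySem.Dict String (List Int)) k =>
      let idx := PySem.Set.ofList (d.getD k [])
      let idx := PySem.Set.diff idx st.1
      (PySem.Set.update st.1 idx, st.2.insert k (PySem.List.sorted idx (fun x => x) false)))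
    (PySem.Set.empty, PySem.Dict.empty)
  let full := st.2.values.foldl (fun f v => PySem.Set.update f v) PySem.Set.empty
  (st.2.insert "BA_full_frontal" (PySem.List.sorted full (fun x => x) false)).items

-- ===== PORT B =====
-- Source B's inner loop: record k as owner of each not-yet-owned index of l.
def ownerStep (k : String) (ow : PySem.Dict Int String) (l : List Int) : PySem.Dict Int String :=
  l.foldl (fun ow i => if ow.contains i then ow else ow.insert i k) ow

-- Literal port of B (Source B). owner[i] on i ∈ owner -> getD with an unused default.
def make_rois_exclusive_alt (rois : List (String × List Int)) : List (String × List Int) :=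
  let priority : List String := ["BA_10", "BA_9_46", "BA_8", "BA_6", "BROCA"]
  let d : PySem.Dict String (List Int) := PySem.Dict.mk rois
  let owner := priority.foldl (fun ow k => ownerStep k ow (d.getD k [])) PySem.Dict.empty
  let init := priority.foldl (fun nr k => nr.insert k ([] : List Int)) PySem.Dict.empty
  let s := PySem.List.sorted owner.keys (fun x => x) false
  let grouped := s.foldl (fun nr i => nr.modify (owner.getD i "") [] (fun l => l ++ [i])) init
  (grouped.insert "BA_full_frontal" s).items

-- ===== PRECONDITION & SPEC =====
def Spec_make_rois_exclusive (rois : List (String × List Int)) (out : List (String × List Int)) : Prop := out = make_rois_exclusive_alt rois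
instance (rois : List (String × List Int)) (out : List (String × List Int)) : Decidable (Spec_make_rois_exclusive rois out) := by unfold Spec_make_rois_exclusive; infer_instance

-- ===== CLAIM (what is proved, stated in full; the proofs are below) =====
def Claim_equal_make_rois_exclusive : Prop := ∀ (rois : List (String × List Int)), Dom_make_rois_exclusive rois → Spec_make_rois_exclusive rois (make_rois_exclusive rois)

-- ===== LEMMAS AND PROOFS =====

-- Both ports, generalized over the priority list ks and the per-key index lists f.
def stA (f : String → List Int) (ks : List String) :
    PySem.Set Int × PySem.Dict String (List Int) :=
  ks.foldl
    (fun (st : PySem.Set Int × PySem.Dict String (List Int)) k =>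
      (st.1.update ((PySem.Set.ofList (f k)).diff st.1),
       st.2.insert k (PySem.List.sorted ((PySem.Set.ofList (f k)).diff st.1) (fun x => x) false)))
    (PySem.Set.empty, PySem.Dict.empty)

def genA (f : String → List Int) (ks : List String) : List (String × List Int) :=
  ((stA f ks).2.insert "BA_full_frontal"
    (PySem.List.sorted ((stA f ks).2.values.foldl (fun f v => PySem.Set.update f v) PySem.Set.empty)
      (fun x => x) false)).items

def ownerOf (f : String → List Int) (ks : List String) : PySem.Dict Int String :=
  ks.foldl (fun ow k => ownerStep k ow (f k)) PySem.Dict.empty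

def sOf (f : String → List Int) (ks : List String) : List Int :=
  PySem.List.sorted (ownerOf f ks).keys (fun x => x) false

def initOf (ks : List String) : PySem.Dict String (List Int) :=
  ks.foldl (fun nr k => nr.insert k ([] : List Int)) PySem.Dict.empty

def groupedOf (f : String → List Int) (ks : List String) : PySem.Dict String (List Int) :=
  (sOf f ks).foldl (fun nr i => nr.modify ((ownerOf f ks).getD i "") [] (fun l => l ++ [i]))
    (initOf ks)

def genB (f : String → List Int) (ks : List String) : List (String × List Int) :=
  ((groupedOf f ks).insert "BA_full_frontal" (sOf f ks)).items

-- The list of (key, exclusive sorted indices) pairs A's loop produces, from assigned-set a.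
def exA (f : String → List Int) : List String → PySem.Set Int → List (String × List Int)
  | [], _ => []
  | k :: ks, a =>
    (k, PySem.List.sorted ((PySem.Set.ofList (f k)).diff a) (fun x => x) false)
      :: exA f ks (a.update ((PySem.Set.ofList (f k)).diff a))

lemma exA_map_fst (f : String → List Int) (ks : List String) (a : PySem.Set Int) :
    (exA f ks a).map Prod.fst = ks := by
  induction ks generalizing a with
  | nil => rfl
  | cons k ks ih => simp [exA, ih]

lemma foldA_items (f : String → List Int) (ks : List String) (a : PySem.Set Int)
    (nr : PySem.Dict String (List Int))
    (hfresh : ∀ k ∈ ks, nr.contains k = false) (hnd : ks.Nodup) :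
    (ks.foldl
      (fun (st : PySem.Set Int × PySem.Dict String (List Int)) k =>
        (st.1.update ((PySem.Set.ofList (f k)).diff st.1),
         st.2.insert k (PySem.List.sorted ((PySem.Set.ofList (f k)).diff st.1) (fun x => x) false)))
      (a, nr)).2.items = nr.items ++ exA f ks a := by
  induction ks generalizing a nr with
  | nil => simp [exA]
  | cons k ks ih =>
    simp only [List.foldl_cons, exA]
    rw [ih _ _ ?_ hnd.of_cons]
    · rw [PySem.Dict.items_insert_of_not_contains nr _ (hfresh k (by simp))]
      simp
    · intro k' hk'
      rw [PySem.Dict.contains_insert]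
      have : (k' == k) = false := by
        simp only [beq_eq_false_iff_ne, ne_eq]
        rintro rfl
        exact (List.nodup_cons.mp hnd).1 hk'
      simp [this, hfresh k' (List.mem_cons_of_mem _ hk')]

lemma mem_exA_values (f : String → List Int) (ks : List String) (a : PySem.Set Int) (i : Int) :
    (∃ v ∈ (exA f ks a).map Prod.snd, i ∈ v) ↔ (i ∉ a ∧ ∃ k ∈ ks, i ∈ f k) := by
  induction ks generalizing a with
  | nil => simp [exA]
  | cons k ks ih =>
    simp only [exA, List.map_cons, List.mem_cons, exists_eq_or_imp, PySem.List.mem_sorted,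
      PySem.Set.mem_diff, PySem.Set.mem_ofList]
    rw [ih]
    simp only [PySem.Set.mem_update, PySem.Set.mem_diff, PySem.Set.mem_ofList]
    constructor
    · rintro (⟨h1, h2⟩ | ⟨h1, h2⟩) <;> tauto
    · rintro ⟨hna, (hf | ⟨k', hk', hf⟩)⟩
      · tauto
      · by_cases hfk : i ∈ f k
        · tauto
        · exact Or.inr ⟨by tauto, k', hk', hf⟩

lemma mem_foldl_update (vs : List (List Int)) (s : PySem.Set Int) (i : Int) :
    i ∈ vs.foldl (fun f v => PySem.Set.update f v) s ↔ i ∈ s ∨ ∃ v ∈ vs, i ∈ v := by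
  induction vs generalizing s with
  | nil => simp
  | cons v vs ih => rw [List.foldl_cons, ih]; simp [PySem.Set.mem_update, or_assoc]

lemma nodup_foldl_update (vs : List (List Int)) (s : PySem.Set Int) (h : s.Nodup) :
    (vs.foldl (fun f v => PySem.Set.update f v) s).Nodup := by
  induction vs generalizing s with
  | nil => exact h
  | cons v vs ih => exact ih _ (PySem.Set.nodup_update _ _ h)

lemma ownerStep_get? (k : String) (ow : PySem.Dict Int String) (l : List Int) (i : Int) :
    (ownerStep k ow l).get? i =
      match ow.get? i with
      | some v => some v
      | none => if i ∈ l then some k else none := by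
  induction l generalizing ow with
  | nil => cases h : ow.get? i <;> simp [ownerStep, h]
  | cons x l ih =>
    show (ownerStep k (if ow.contains x then ow else ow.insert x k) l).get? i = _
    by_cases hc : ow.contains x = true
    · rw [if_pos hc, ih]
      cases h : ow.get? i with
      | some v => rfl
      | none =>
        have hx : i ≠ x := by
          rintro rfl
          rw [PySem.Dict.contains_eq_isSome_get?, h] at hc
          simp at hc
        simp [List.mem_cons, hx]
    · rw [if_neg hc, ih]
      rw [Bool.not_eq_true] at hc
      by_cases hx : i = x
      · subst hx
        rw [PySem.Dict.get?_insert_self]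
        have h0 : ow.get? i = none := by
          rw [PySem.Dict.contains_eq_isSome_get?] at hc
          cases h : ow.get? i with
          | some v => rw [h] at hc; simp at hc
          | none => rfl
        simp [h0]
      · rw [PySem.Dict.get?_insert_of_ne ow k hx]
        cases h : ow.get? i with
        | some v => rfl
        | none => simp [List.mem_cons, hx]

lemma ownerStep_nodup (k : String) (ow : PySem.Dict Int String) (l : List Int)
    (h : ow.keys.Nodup) : (ownerStep k ow l).keys.Nodup := by
  induction l generalizing ow with
  | nil => exact h
  | cons x l ih =>
    show (ownerStep k (if ow.contains x then ow else ow.insert x k) l).keys.Nodup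
    by_cases hc : ow.contains x = true
    · rw [if_pos hc]; exact ih _ h
    · rw [if_neg hc]; exact ih _ (PySem.Dict.nodup_keys_insert _ _ _ h)

lemma foldOwner_get? (f : String → List Int) (ks : List String) (ow : PySem.Dict Int String)
    (i : Int) :
    ((ks.foldl (fun ow k => ownerStep k ow (f k)) ow).get? i) =
      match ow.get? i with
      | some v => some v
      | none => ks.find? (fun k => decide (i ∈ f k)) := by
  induction ks generalizing ow with
  | nil => cases h : ow.get? i <;> simp [h]
  | cons k ks ih =>
    rw [List.foldl_cons, ih, ownerStep_get?]
    cases h : ow.get? i with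
    | some v => rfl
    | none =>
      by_cases hm : i ∈ f k
      · simp [hm, List.find?_cons_of_pos]
      · simp [hm, List.find?_cons_of_neg]

lemma ownerOf_nodup (f : String → List Int) (ks : List String) :
    (ownerOf f ks).keys.Nodup := by
  have : ∀ ow : PySem.Dict Int String, ow.keys.Nodup →
      ((ks.foldl (fun ow k => ownerStep k ow (f k)) ow).keys).Nodup := by
    induction ks with
    | nil => exact fun ow h => h
    | cons k ks ih => exact fun ow h => ih _ (ownerStep_nodup _ _ _ h)
  exact this PySem.Dict.empty (by rw [PySem.Dict.keys_empty]; exact List.nodup_nil)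

lemma ownerOf_get? (f : String → List Int) (ks : List String) (i : Int) :
    (ownerOf f ks).get? i = ks.find? (fun k => decide (i ∈ f k)) := by
  rw [ownerOf, foldOwner_get?]
  simp [PySem.Dict.get?_empty]

-- A sorted-by-identity list is determined by membership: any strictly increasing list
-- with the same members is sorted(xs).
lemma sorted_id_eq (xs ys : List Int) (hx : xs.Nodup)
    (hy : ys.Pairwise (fun a b => a < b)) (h : ∀ i, i ∈ xs ↔ i ∈ ys) :
    PySem.List.sorted xs (fun x => x) false = ys := by
  apply PySem.List.sorted_eq_of_perm_of_pairwise_lt xs ys (fun x => x) ?_ hy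
  have hynd : ys.Nodup := hy.imp fun hab => ne_of_lt hab
  exact (List.perm_ext_iff_of_nodup hynd hx).mpr fun a => (h a).symm

lemma sorted_keys_pairwise (ow : PySem.Dict Int String) (h : ow.keys.Nodup) :
    (PySem.List.sorted ow.keys (fun x => x) false).Pairwise (fun a b => a < b) := by
  have := PySem.List.sorted_ofList_pairwise_lt ow.keys
  rwa [PySem.Set.ofList_eq_self_of_nodup _ h] at this

lemma mem_sorted_keys (ow : PySem.Dict Int String) (i : Int) :
    i ∈ PySem.List.sorted ow.keys (fun x => x) false ↔ (ow.get? i).isSome := by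
  rw [PySem.List.mem_sorted]
  constructor
  · intro h
    cases hg : ow.get? i with
    | some v => simp
    | none => exact absurd h ((PySem.Dict.get?_eq_none_iff_not_mem_keys _ _).mp hg)
  · intro h
    by_contra hmem
    rw [(PySem.Dict.get?_eq_none_iff_not_mem_keys _ _).mpr hmem] at h
    simp at h

lemma sOf_mem (f : String → List Int) (ks : List String) (i : Int) :
    i ∈ sOf f ks ↔ ∃ k ∈ ks, i ∈ f k := by
  rw [sOf, mem_sorted_keys, ownerOf_get? f ks i]
  rw [List.find?_isSome]
  simp

lemma init_getD (ks : List String) (d : PySem.Dict String (List Int)) (k : String)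
    (h : d.getD k [] = []) :
    (ks.foldl (fun nr k' => nr.insert k' ([] : List Int)) d).getD k [] = [] := by
  induction ks generalizing d with
  | nil => exact h
  | cons k' ks ih =>
    rw [List.foldl_cons]
    apply ih
    rw [PySem.Dict.getD_insert]
    split_ifs <;> simp [h]

lemma update_keeps_str (s : PySem.Set String) (l : List String) (h : ∀ x ∈ l, x ∈ s) :
    PySem.Set.update s l = s := by
  induction l generalizing s with
  | nil => rfl
  | cons x l ih =>
    show PySem.Set.update (s.add x) l = s
    have : s.add x = s := by
      unfold PySem.Set.add
      rw [if_pos ((PySem.Set.contains_iff s x).mpr (h x (by simp)))]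
    rw [this]
    exact ih s fun y hy => h y (List.mem_cons_of_mem _ hy)

lemma grouped_getD (g : Int → String) (s' : List Int) (d0 : PySem.Dict String (List Int))
    (k : String) :
    (s'.foldl (fun nr i => nr.modify (g i) [] (fun l => l ++ [i])) d0).getD k []
      = d0.getD k [] ++ s'.filter (fun i => g i == k) := by
  have h1 : s'.foldl (fun nr i => nr.modify (g i) [] (fun l => l ++ [i])) d0
      = (s'.map (fun i => (g i, i))).foldl (fun d p => d.modify p.1 [] (fun x => x ++ [p.2])) d0 := by
    rw [List.foldl_map]
  rw [h1, PySem.Dict.getD_foldl_modify_append]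
  congr 1
  rw [List.filter_map, List.map_map]
  simp [Function.comp_def]

-- The heart of the proof: A's per-key exclusive lists are exactly the grouped-by-owner
-- slices of the sorted owned indices.
lemma main_loop (f : String → List Int) (ks : List String) (ow : PySem.Dict Int String)
    (how : ∀ i, ow.get? i = ks.find? (fun k => decide (i ∈ f k)))
    (hnd : ks.Nodup) (hok : ow.keys.Nodup) :
    ∀ ks' taken a, ks = taken ++ ks' →
      (∀ i, i ∈ a ↔ ∃ k ∈ taken, i ∈ f k) →
      exA f ks' a = ks'.map (fun k =>
        (k, (PySem.List.sorted ow.keys (fun x => x) false).filter (fun i => ow.getD i "" == k))) := by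
  intro ks'
  induction ks' with
  | nil => intro taken a _ _; rfl
  | cons k ks' ih =>
    intro taken a hsplit ha
    have hndsp := hsplit ▸ hnd
    rw [List.nodup_append] at hndsp
    have hknotaken : k ∉ taken := fun hkt => hndsp.2.2 k hkt k (by simp) rfl
    have hknotks' : k ∉ ks' := fun h => (List.nodup_cons.mp hndsp.2.1).1 h
    -- key characterization: ow.get? i = some k ↔ i ∈ f k ∧ i ∉ a
    have hchar : ∀ i : Int, ow.get? i = some k ↔ (i ∈ f k ∧ i ∉ a) := by
      intro i
      rw [how i, hsplit, List.find?_append]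
      constructor
      · intro h
        cases htk : taken.find? (fun k => decide (i ∈ f k)) with
        | some v =>
          rw [htk] at h
          simp only [Option.some_or] at h
          obtain rfl : v = k := by injection h
          exact absurd (List.mem_of_find?_eq_some htk) hknotaken
        | none =>
          rw [htk, Option.none_or] at h
          have hnota : i ∉ a := by
            rw [ha]
            rintro ⟨k'', hk'', hf''⟩
            exact absurd (by simpa using hf'') (by simpa using List.find?_eq_none.mp htk k'' hk'')
          by_cases hm : i ∈ f k
          · exact ⟨hm, hnota⟩
          · rw [List.find?_cons_of_neg (by simpa using hm)] at h
            exact absurd (List.mem_of_find?_eq_some h) hknotks'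
      · rintro ⟨hm, hnota⟩
        have htk : taken.find? (fun k => decide (i ∈ f k)) = none := by
          rw [List.find?_eq_none]
          intro k'' hk''
          simp only [decide_eq_true_eq]
          exact fun hf'' => hnota ((ha i).mpr ⟨k'', hk'', hf''⟩)
        rw [htk, Option.none_or, List.find?_cons_of_pos (by simpa using hm)]
    have hhead :
        PySem.List.sorted ((PySem.Set.ofList (f k)).diff a) (fun x => x) false
          = (PySem.List.sorted ow.keys (fun x => x) false).filter (fun i => ow.getD i "" == k) := by
      apply sorted_id_eq
      · exact PySem.Set.nodup_diff _ _ (PySem.Set.nodup_ofList _)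
      · exact List.Pairwise.filter _ (sorted_keys_pairwise ow hok)
      · intro i
        rw [PySem.Set.mem_diff, PySem.Set.mem_ofList, List.mem_filter, mem_sorted_keys]
        rw [← hchar i]
        constructor
        · intro h
          constructor
          · rw [h]; rfl
          · simp [PySem.Dict.getD, h]
        · rintro ⟨hs, hb⟩
          simp only [PySem.Dict.getD] at hb
          cases hg : ow.get? i with
          | none => rw [hg] at hs; simp at hs
          | some v =>
            rw [hg] at hb
            simp only [Option.getD_some, beq_iff_eq] at hb
            rw [hb]
    rw [List.map_cons, exA, hhead]
    congr 1
    apply ih (taken ++ [k]) _ (by simpa using hsplit)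
    intro i
    rw [PySem.Set.mem_update, PySem.Set.mem_diff, PySem.Set.mem_ofList, ha i]
    simp only [List.mem_append, List.mem_singleton]
    constructor
    · rintro (⟨k'', hk'', hf''⟩ | ⟨hf, hna⟩)
      · exact ⟨k'', Or.inl hk'', hf''⟩
      · exact ⟨k, Or.inr rfl, hf⟩
    · rintro ⟨k'', hk'' | rfl, hf''⟩
      · exact Or.inl ⟨k'', hk'', hf''⟩
      · by_cases hia : ∃ k'' ∈ taken, i ∈ f k''
        · exact Or.inl hia
        · exact Or.inr ⟨hf'', hia⟩

theorem gen_eq (f : String → List Int) (ks : List String)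
    (hnd : ks.Nodup) (hff : "BA_full_frontal" ∉ ks) :
    genA f ks = genB f ks := by
  have hok := ownerOf_nodup f ks
  -- ===== A side =====
  have hitems : (stA f ks).2.items = exA f ks PySem.Set.empty := by
    have := foldA_items f ks PySem.Set.empty PySem.Dict.empty
      (fun k _ => PySem.Dict.contains_empty k) hnd
    simpa [stA] using this
  have hkeysA : (stA f ks).2.keys = ks := by
    show (stA f ks).2.items.map Prod.fst = ks
    rw [hitems, exA_map_fst]
  have hcontA : (stA f ks).2.contains "BA_full_frontal" = false := by
    cases hb : (stA f ks).2.contains "BA_full_frontal" with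
    | false => rfl
    | true => exact absurd (hkeysA ▸ (PySem.Dict.contains_iff_mem_keys _ _).mp hb) hff
  have hvals : (stA f ks).2.values = (exA f ks PySem.Set.empty).map Prod.snd := by
    show (stA f ks).2.items.map Prod.snd = _
    rw [hitems]
  have hfullmem : ∀ i,
      i ∈ (stA f ks).2.values.foldl (fun f v => PySem.Set.update f v) PySem.Set.empty
        ↔ ∃ k ∈ ks, i ∈ f k := by
    intro i
    rw [mem_foldl_update, hvals, mem_exA_values]
    simp [PySem.Set.empty]
  have hfull :
      PySem.List.sorted ((stA f ks).2.values.foldl (fun f v => PySem.Set.update f v) PySem.Set.empty)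
        (fun x => x) false = sOf f ks := by
    apply sorted_id_eq
    · exact nodup_foldl_update _ _ List.nodup_nil
    · exact sorted_keys_pairwise _ hok
    · intro i
      rw [hfullmem i, sOf_mem]
  have hgenA : genA f ks = exA f ks PySem.Set.empty ++ [("BA_full_frontal", sOf f ks)] := by
    rw [genA, PySem.Dict.items_insert_of_not_contains _ _ hcontA, hitems, hfull]
  -- ===== B side =====
  have hownvals : ∀ x ∈ (sOf f ks).map (fun i => (ownerOf f ks).getD i ""), x ∈ ks := by
    intro x hx
    obtain ⟨i, hi, rfl⟩ := List.mem_map.mp hx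
    have hiS : ((ownerOf f ks).get? i).isSome := (mem_sorted_keys _ i).mp hi
    cases hg : (ownerOf f ks).get? i with
    | none => rw [hg] at hiS; simp at hiS
    | some v =>
      have hv : v ∈ ks := by
        have := (ownerOf_get? f ks i).symm.trans hg
        exact List.mem_of_find?_eq_some this
      rw [PySem.Dict.getD, hg]
      simpa using hv
  have hkeysInit : (initOf ks).keys = ks := by
    have h := PySem.Dict.keys_foldl_insert (ν := List Int) ks (fun _ _ => []) PySem.Dict.empty
    simp only [] at h
    rw [initOf, h, PySem.Dict.keys_empty]
    show PySem.Set.ofList ks = ks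
    exact PySem.Set.ofList_eq_self_of_nodup _ hnd
  have hkeysG : (groupedOf f ks).keys = ks := by
    have h := PySem.Dict.keys_foldl_modify_key (sOf f ks)
      (fun i => (ownerOf f ks).getD i "") ([] : List Int)
      (fun _ i => fun l => l ++ [i]) (initOf ks)
    simp only [] at h
    rw [groupedOf, h, hkeysInit]
    exact update_keeps_str _ _ hownvals
  have hcontG : (groupedOf f ks).contains "BA_full_frontal" = false := by
    cases hb : (groupedOf f ks).contains "BA_full_frontal" with
    | false => rfl
    | true => exact absurd (hkeysG ▸ (PySem.Dict.contains_iff_mem_keys _ _).mp hb) hff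
  have hgetD : ∀ k, (groupedOf f ks).getD k []
      = (sOf f ks).filter (fun i => (ownerOf f ks).getD i "" == k) := by
    intro k
    rw [groupedOf, grouped_getD, initOf, init_getD ks PySem.Dict.empty k (PySem.Dict.getD_empty _ _)]
    simp
  have hitemsG : (groupedOf f ks).items
      = ks.map (fun k => (k, (sOf f ks).filter (fun i => (ownerOf f ks).getD i "" == k))) := by
    have hnd' : (groupedOf f ks).keys.Nodup := by rw [hkeysG]; exact hnd
    rw [PySem.Dict.items_eq_map_keys _ hnd' [], hkeysG]
    exact List.map_congr_left fun k _ => by rw [hgetD k]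
  have hgenB : genB f ks
      = ks.map (fun k => (k, (sOf f ks).filter (fun i => (ownerOf f ks).getD i "" == k)))
        ++ [("BA_full_frontal", sOf f ks)] := by
    rw [genB, PySem.Dict.items_insert_of_not_contains _ _ hcontG, hitemsG]
  -- ===== combine =====
  rw [hgenA, hgenB]
  congr 1
  exact main_loop f ks (ownerOf f ks) (ownerOf_get? f ks) hnd hok ks [] PySem.Set.empty rfl
    (fun i => by simp [PySem.Set.empty])

-- ===== VERDICT (by name: the statement is the Claim_ definition above) =====
theorem make_rois_exclusive_spec : Claim_equal_make_rois_exclusive := by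
  intro rois _
  unfold Spec_make_rois_exclusive
  exact gen_eq (fun k => (PySem.Dict.mk rois).getD k [])
    ["BA_10", "BA_9_46", "BA_8", "BA_6", "BROCA"] (by decide) (by decide)
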